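-- pv_equiv track=rewrite | github.com/xxxspy/minesweeper-bot | minebot/bot.py | _all_same_ceils
-- ===== SOURCE A (Python) =====
-- def _all_same_ceils(allceils: list, mineceil_groups: list):
--     mines = []
--     nones = []
--     for c in allceils:
--         sm = 0
--         for group in mineceil_groups:
--             sm += (c in group)
--         if sm == 0:
--             nones.append(c)
--         elif sm == len(mineceil_groups):
--             mines.append(c)
--     return mines, nones
-- ===== SOURCE B (Python) =====
-- def _all_same_ceils(allceils: list, mineceil_groups: list):
--     if not mineceil_groups:
--         return [], list(allceils)
--     sets = [set(g) for g in mineceil_groups]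
--     union = set().union(*sets)
--     inter = set.intersection(*sets)
--     mines = [c for c in allceils if c in inter]
--     nones = [c for c in allceils if c not in union]
--     return mines, nones
-- ===== Notes on version B (the rewrite author's own statement) =====
-- stated objective: faster
-- what changed: Replaces the per-ceil inner scan counting membership in every group by a union set and an intersection set of all groups built once, followed by one membership-filter pass over allceils.
import Mathlib
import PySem

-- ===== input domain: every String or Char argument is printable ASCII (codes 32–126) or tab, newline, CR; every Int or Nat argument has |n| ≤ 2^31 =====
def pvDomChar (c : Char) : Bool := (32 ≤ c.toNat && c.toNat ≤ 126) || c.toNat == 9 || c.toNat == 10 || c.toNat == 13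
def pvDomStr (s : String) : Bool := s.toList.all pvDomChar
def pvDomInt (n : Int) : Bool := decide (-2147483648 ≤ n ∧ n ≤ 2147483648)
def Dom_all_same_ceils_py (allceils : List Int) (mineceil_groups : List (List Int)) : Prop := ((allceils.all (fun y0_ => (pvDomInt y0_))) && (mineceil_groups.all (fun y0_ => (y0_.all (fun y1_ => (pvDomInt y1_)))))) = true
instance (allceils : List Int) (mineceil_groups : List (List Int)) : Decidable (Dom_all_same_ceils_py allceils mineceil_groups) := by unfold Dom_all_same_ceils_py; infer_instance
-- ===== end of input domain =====

-- B replaces A's per-ceil counting scan over all groups by a union set and an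
-- intersection set built once, then one membership pass over allceils (idiomatic).

-- ===== PORT A =====
-- the body of A's outer loop: count the groups containing c, then classify c
def stepA (mineceil_groups : List (List Int)) (acc : List Int × List Int) (c : Int) : List Int × List Int :=
  let sm : Int := mineceil_groups.foldl (fun s group => s + (if c ∈ group then 1 else 0)) 0
  if sm = 0 then (acc.1, acc.2 ++ [c])
  else if sm = (mineceil_groups.length : Int) then (acc.1 ++ [c], acc.2)
  else acc

def all_same_ceils_py (allceils : List Int) (mineceil_groups : List (List Int)) : List Int × List Int :=
  allceils.foldl (stepA mineceil_groups) ([], [])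

-- ===== PORT B =====
def all_same_ceils_py_alt (allceils : List Int) (mineceil_groups : List (List Int)) : List Int × List Int :=
  match mineceil_groups with
  | [] => ([], allceils)
  | g :: rest =>
    let sets := (g :: rest).map PySem.Set.ofList
    let union := sets.foldl (fun s t => PySem.Set.union s t) PySem.Set.empty
    let inter := sets.tail.foldl (fun s t => PySem.Set.inter s t) sets.head!
    let mines := allceils.filter (fun c => PySem.Set.contains inter c)
    let nones := allceils.filter (fun c => !PySem.Set.contains union c)
    (mines, nones)

-- ===== PRECONDITION & SPEC =====
def Spec_all_same_ceils_py (allceils : List Int) (mineceil_groups : List (List Int)) (out : List Int × List Int) : Prop := out = all_same_ceils_py_alt allceils mineceil_groups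
instance (allceils : List Int) (mineceil_groups : List (List Int)) (out : List Int × List Int) : Decidable (Spec_all_same_ceils_py allceils mineceil_groups out) := by unfold Spec_all_same_ceils_py; infer_instance

-- ===== CLAIM (what is proved, stated in full; the proofs are below) =====
def Claim_equal_all_same_ceils_py : Prop := ∀ (allceils : List Int) (mineceil_groups : List (List Int)), Dom_all_same_ceils_py allceils mineceil_groups → Spec_all_same_ceils_py allceils mineceil_groups (all_same_ceils_py allceils mineceil_groups)

-- ===== LEMMAS AND PROOFS =====

-- A's inner loop computes the number of groups containing c
theorem sm_eq_countP (groups : List (List Int)) (c : Int) (a : Int) :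
    groups.foldl (fun s group => s + (if c ∈ group then 1 else 0)) a
      = a + (groups.countP (fun g => decide (c ∈ g)) : Int) := by
  induction groups generalizing a with
  | nil => simp
  | cons g gs ih =>
    simp only [List.foldl_cons, ih, List.countP_cons, decide_eq_true_eq]
    split_ifs with h <;> push_cast <;> ring

theorem countP_eq_zero_iff (groups : List (List Int)) (c : Int) :
    groups.countP (fun g => decide (c ∈ g)) = 0 ↔ ∀ g ∈ groups, c ∉ g := by
  simp [List.countP_eq_zero]

theorem countP_eq_len_iff (groups : List (List Int)) (c : Int) :
    groups.countP (fun g => decide (c ∈ g)) = groups.length ↔ ∀ g ∈ groups, c ∈ g := by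
  simp [List.countP_eq_length]

-- membership in B's union fold
theorem mem_union_fold (sets : List (List Int)) (s : PySem.Set Int) (c : Int) :
    c ∈ sets.foldl (fun s t => PySem.Set.union s t) s ↔ c ∈ s ∨ ∃ t ∈ sets, c ∈ t := by
  induction sets generalizing s with
  | nil => simp
  | cons t ts ih =>
    simp only [List.foldl_cons, ih, PySem.Set.mem_union]
    constructor
    · rintro (⟨h | h⟩ | ⟨u, hu, hc⟩)
      · exact Or.inl h
      · exact Or.inr ⟨t, by simp, h⟩
      · exact Or.inr ⟨u, by simp [hu], hc⟩
    · rintro (h | ⟨u, hu, hc⟩)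
      · exact Or.inl (Or.inl h)
      · rcases List.mem_cons.mp hu with rfl | hu
        · exact Or.inl (Or.inr hc)
        · exact Or.inr ⟨u, hu, hc⟩

-- membership in B's intersection fold
theorem mem_inter_fold (sets : List (List Int)) (s : PySem.Set Int) (c : Int) :
    c ∈ sets.foldl (fun s t => PySem.Set.inter s t) s ↔ c ∈ s ∧ ∀ t ∈ sets, c ∈ t := by
  induction sets generalizing s with
  | nil => simp
  | cons t ts ih =>
    simp only [List.foldl_cons, ih, PySem.Set.mem_inter]
    constructor
    · rintro ⟨⟨hs, ht⟩, h⟩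
      exact ⟨hs, fun u hu => by rcases List.mem_cons.mp hu with rfl | hu; exact ht; exact h u hu⟩
    · rintro ⟨hs, h⟩
      exact ⟨⟨hs, h t (by simp)⟩, fun u hu => h u (by simp [hu])⟩

-- A's fold produces the two filters (nonempty-group case), relative to any accumulator
theorem foldA_eq (g : List Int) (rest : List (List Int)) (allceils : List Int)
    (acc : List Int × List Int) :
    allceils.foldl (stepA (g :: rest)) acc
    = (acc.1 ++ allceils.filter (fun c => decide (∀ t ∈ g :: rest, c ∈ t)),
       acc.2 ++ allceils.filter (fun c => decide (∀ t ∈ g :: rest, c ∉ t))) := by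
  induction allceils generalizing acc with
  | nil => simp
  | cons c cs ih =>
    rw [List.foldl_cons, ih, List.filter_cons, List.filter_cons]
    unfold stepA
    have hsm := sm_eq_countP (g :: rest) c 0
    by_cases h0 : ∀ t ∈ g :: rest, c ∉ t
    · have hz : ((g :: rest).countP (fun t => decide (c ∈ t)) : Int) = 0 := by
        exact_mod_cast (countP_eq_zero_iff _ c).mpr h0
      have hnall : ¬ ∀ t ∈ g :: rest, c ∈ t := fun h =>
        (h0 g (by simp)) (h g (by simp))
      simp only [hsm, zero_add, hz]
      rw [decide_eq_true h0, decide_eq_false hnall]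
      simp
    · by_cases h1 : ∀ t ∈ g :: rest, c ∈ t
      · have hl : ((g :: rest).countP (fun t => decide (c ∈ t)) : Int)
            = ((g :: rest).length : Int) := by
          exact_mod_cast (countP_eq_len_iff _ c).mpr h1
        have hnz : ((g :: rest).countP (fun t => decide (c ∈ t)) : Int) ≠ 0 := by
          rw [hl]; simp only [List.length_cons]; push_cast; omega
        have hn0 : ¬ ∀ t ∈ g :: rest, c ∉ t := fun h => (h g (by simp)) (h1 g (by simp))
        simp only [hsm, zero_add, hl]
        rw [decide_eq_true h1, decide_eq_false hn0]
        have hlen : ((rest.length : Int) + 1) ≠ 0 := by omega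
        simp [hlen]
      · have hnz : ((g :: rest).countP (fun t => decide (c ∈ t)) : Int) ≠ 0 := by
          intro h
          exact h0 ((countP_eq_zero_iff _ c).mp (by exact_mod_cast h))
        have hnl : ((g :: rest).countP (fun t => decide (c ∈ t)) : Int)
            ≠ ((g :: rest).length : Int) := by
          intro h
          exact h1 ((countP_eq_len_iff _ c).mp (by exact_mod_cast h))
        simp only [hsm, zero_add, if_neg hnz, if_neg hnl]
        rw [decide_eq_false h0, decide_eq_false h1]
        simp

-- A's fold with no groups: sm = 0 for every ceil, so everything goes to nones
theorem foldA_nil (allceils : List Int) (acc : List Int × List Int) :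
    allceils.foldl (stepA []) acc = (acc.1, acc.2 ++ allceils) := by
  induction allceils generalizing acc with
  | nil => simp
  | cons c cs ih => simp [List.foldl_cons, ih, stepA]

theorem contains_eq_decide (s : PySem.Set Int) (c : Int) :
    PySem.Set.contains s c = decide (c ∈ s) := by
  simp [PySem.Set.contains_eq_listContains]

-- ===== VERDICT (by name: the statement is the Claim_ definition above) =====
theorem all_same_ceils_py_spec : Claim_equal_all_same_ceils_py := by
  intro allceils groups _
  unfold Spec_all_same_ceils_py all_same_ceils_py all_same_ceils_py_alt
  match groups with
  | [] => rw [foldA_nil]; rfl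

  | g :: rest =>
    rw [foldA_eq]
    simp only [List.map_cons, List.tail_cons, List.head!, List.nil_append]
    congr 1
    · apply List.filter_congr
      intro c _
      rw [contains_eq_decide]
      apply decide_eq_decide.mpr
      rw [mem_inter_fold]
      simp [PySem.Set.mem_ofList]
    · apply List.filter_congr
      intro c _
      rw [contains_eq_decide, ← decide_not]
      apply decide_eq_decide.mpr
      rw [mem_union_fold]
      simp [PySem.Set.mem_ofList, PySem.Set.empty]
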